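-- pv_equiv track=rewrite | github.com/NikKohlmeier/job-helper | src/resume_generator.py | _detect_role_type
-- ===== SOURCE A (Python) =====
-- def _detect_role_type(job_title: str) -> str:
--     """Detect role type from job title."""
--     title_lower = job_title.lower()
--
--     if 'wordpress' in title_lower:
--         return 'wordpress'
--     elif 'frontend' in title_lower or 'front-end' in title_lower or 'front end' in title_lower:
--         return 'frontend'
--     elif 'full-stack' in title_lower or 'full stack' in title_lower or 'fullstack' in title_lower:
--         return 'full-stack'
--     elif any(word in title_lower for word in ['agency', 'client', 'consulting']):
--         return 'agency'
--     elif any(word in title_lower for word in ['education', 'nonprofit', 'healthcare', 'mission']):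
--         return 'mission-driven'
--     else:
--         return 'full-stack'  # Default
-- ===== SOURCE B (Python) =====
-- _KEYWORDS = [
--     (0, 'wordpress'),
--     (1, 'frontend'), (1, 'front-end'), (1, 'front end'),
--     (2, 'full-stack'), (2, 'full stack'), (2, 'fullstack'),
--     (3, 'agency'), (3, 'client'), (3, 'consulting'),
--     (4, 'education'), (4, 'nonprofit'), (4, 'healthcare'), (4, 'mission'),
-- ]
-- _LABELS = ['wordpress', 'frontend', 'full-stack', 'agency', 'mission-driven']
--
-- def _detect_role_type(job_title: str) -> str:
--     """Detect role type by one left-to-right scan of the title: at every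
--     position record the lowest-priority keyword starting there."""
--     t = job_title.lower()
--     best = 5
--     for i in range(len(t)):
--         for prio, word in _KEYWORDS:
--             if t.startswith(word, i) and prio < best:
--                 best = prio
--     return _LABELS[best] if best < 5 else 'full-stack'
-- ===== Notes on version B (the rewrite author's own statement) =====
-- stated objective: alternative
-- what changed: Instead of testing rule groups in priority order with substring searches, B makes a single left-to-right positional scan of the lowered title, at each index checking which keywords start there and keeping the minimum priority seen; the label is picked from that minimum at the end.
import Mathlib
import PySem

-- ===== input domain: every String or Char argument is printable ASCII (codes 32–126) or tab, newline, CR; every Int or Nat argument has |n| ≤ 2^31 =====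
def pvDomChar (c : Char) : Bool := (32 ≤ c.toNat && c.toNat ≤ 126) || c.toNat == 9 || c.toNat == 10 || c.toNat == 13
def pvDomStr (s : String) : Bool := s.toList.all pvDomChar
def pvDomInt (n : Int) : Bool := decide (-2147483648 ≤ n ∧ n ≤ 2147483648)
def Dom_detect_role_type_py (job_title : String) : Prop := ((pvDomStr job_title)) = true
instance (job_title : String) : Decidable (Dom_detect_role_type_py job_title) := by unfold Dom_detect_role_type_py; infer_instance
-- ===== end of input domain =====

-- B replaces A's priority-ordered substring searches by a single left-to-right positional scan
-- of the lowered title that keeps the minimum matching keyword priority (alternative; same cost).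


-- ===== PORT A =====
def detect_role_type_py (job_title : String) : String :=
  let title_lower := PySem.Str.lower job_title
  if PySem.Str.isIn "wordpress" title_lower then "wordpress"
  else if PySem.Str.isIn "frontend" title_lower || PySem.Str.isIn "front-end" title_lower
       || PySem.Str.isIn "front end" title_lower then "frontend"
  else if PySem.Str.isIn "full-stack" title_lower || PySem.Str.isIn "full stack" title_lower
       || PySem.Str.isIn "fullstack" title_lower then "full-stack"
  else if (["agency", "client", "consulting"].any fun word => PySem.Str.isIn word title_lower) then "agency"
  else if (["education", "nonprofit", "healthcare", "mission"].any fun word => PySem.Str.isIn word title_lower) then "mission-driven"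
  else "full-stack"

-- ===== PORT B =====
def pvKeywords : List (Nat × String) :=
  [(0, "wordpress"),
   (1, "frontend"), (1, "front-end"), (1, "front end"),
   (2, "full-stack"), (2, "full stack"), (2, "fullstack"),
   (3, "agency"), (3, "client"), (3, "consulting"),
   (4, "education"), (4, "nonprofit"), (4, "healthcare"), (4, "mission")]

def pvLabels : List String := ["wordpress", "frontend", "full-stack", "agency", "mission-driven"]

-- t.startswith(word, i) with 0 ≤ i is ported by hand as startswith on the dropped character
-- list — exact for the nonnegative in-range i produced by range(len(t)).
def detect_role_type_py_alt (job_title : String) : String :=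
  let t := (PySem.Str.lower job_title).toList
  let best : Nat :=
    (PySem.List.pyRange 0 (PySem.Chars.len t) 1).foldl
      (fun best i =>
        pvKeywords.foldl
          (fun b p =>
            if PySem.Chars.startswith (t.drop i.toNat) p.2.toList && decide (p.1 < b) then p.1 else b)
          best)
      5
  -- _LABELS[best] if best < 5 else 'full-stack'; best < 5 keeps the index in range, so pyGet? is some
  if best < 5 then (PySem.List.pyGet? pvLabels (best : Int)).getD "full-stack" else "full-stack"

-- ===== PRECONDITION & SPEC =====
def Spec_detect_role_type_py (job_title : String) (out : String) : Prop := out = detect_role_type_py_alt job_title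
instance (job_title : String) (out : String) : Decidable (Spec_detect_role_type_py job_title out) := by unfold Spec_detect_role_type_py; infer_instance

-- ===== CLAIM (what is proved, stated in full; the proofs are below) =====
def Claim_equal_detect_role_type_py : Prop := ∀ (job_title : String), Dom_detect_role_type_py job_title → Spec_detect_role_type_py job_title (detect_role_type_py job_title)

-- ===== LEMMAS AND PROOFS =====

-- inner fold step
def pvStep (t : List Char) (i : Int) (b : Nat) (p : Nat × String) : Nat :=
  if PySem.Chars.startswith (t.drop i.toNat) p.2.toList && decide (p.1 < b) then p.1 else b

lemma pvStep_le (t : List Char) (i : Int) (b : Nat) (p : Nat × String) :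
    pvStep t i b p ≤ b := by
  unfold pvStep; split
  · next h => exact Nat.le_of_lt (by simp at h; exact h.2)
  · exact le_rfl

lemma inner_le (t : List Char) (i : Int) (L : List (Nat × String)) (b : Nat) :
    L.foldl (pvStep t i) b ≤ b := by
  induction L generalizing b with
  | nil => exact le_rfl
  | cons p tl ih => exact le_trans (ih _) (pvStep_le t i b p)

lemma inner_le_of_mem (t : List Char) (i : Int) (L : List (Nat × String)) (b : Nat)
    (p : Nat × String) (hp : p ∈ L)
    (hsw : PySem.Chars.startswith (t.drop i.toNat) p.2.toList = true) :
    L.foldl (pvStep t i) b ≤ p.1 := by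
  induction L generalizing b with
  | nil => cases hp
  | cons q tl ih =>
    rcases List.mem_cons.mp hp with h | h
    · subst h
      have hb : pvStep t i b p ≤ p.1 := by
        unfold pvStep
        by_cases hlt : p.1 < b
        · simp [hsw, hlt]
        · simp [hsw, hlt]; omega
      exact le_trans (inner_le t i tl _) hb
    · exact ih _ h

lemma inner_cases (t : List Char) (i : Int) (L : List (Nat × String)) (b : Nat) :
    L.foldl (pvStep t i) b = b ∨
      ∃ p ∈ L, p.1 = L.foldl (pvStep t i) b ∧
        PySem.Chars.startswith (t.drop i.toNat) p.2.toList = true := by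
  induction L generalizing b with
  | nil => exact Or.inl rfl
  | cons q tl ih =>
    rcases ih (pvStep t i b q) with h | h
    · simp only [List.foldl_cons, h]
      unfold pvStep
      split
      · next hc =>
        exact Or.inr ⟨q, List.mem_cons_self, rfl, by simp at hc; exact hc.1⟩
      · exact Or.inl rfl
    · rcases h with ⟨p, hp, he, hsw⟩
      exact Or.inr ⟨p, List.mem_cons_of_mem _ hp, he, hsw⟩

-- outer fold
lemma outer_le (t : List Char) (R : List Int) (b : Nat) :
    R.foldl (fun b i => pvKeywords.foldl (pvStep t i) b) b ≤ b := by
  induction R generalizing b with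
  | nil => exact le_rfl
  | cons i tl ih => exact le_trans (ih _) (inner_le t i pvKeywords b)

lemma outer_le_of_mem (t : List Char) (R : List Int) (b : Nat)
    (i : Int) (hi : i ∈ R) (p : Nat × String) (hp : p ∈ pvKeywords)
    (hsw : PySem.Chars.startswith (t.drop i.toNat) p.2.toList = true) :
    R.foldl (fun b i => pvKeywords.foldl (pvStep t i) b) b ≤ p.1 := by
  induction R generalizing b with
  | nil => cases hi
  | cons j tl ih =>
    rcases List.mem_cons.mp hi with h | h
    · subst h
      exact le_trans (outer_le t tl _) (inner_le_of_mem t i pvKeywords b p hp hsw)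
    · exact ih _ h

lemma outer_cases (t : List Char) (R : List Int) (b : Nat) :
    R.foldl (fun b i => pvKeywords.foldl (pvStep t i) b) b = b ∨
      ∃ p ∈ pvKeywords, p.1 = R.foldl (fun b i => pvKeywords.foldl (pvStep t i) b) b ∧
        ∃ i ∈ R, PySem.Chars.startswith (t.drop i.toNat) p.2.toList = true := by
  induction R generalizing b with
  | nil => exact Or.inl rfl
  | cons j tl ih =>
    rcases ih (pvKeywords.foldl (pvStep t j) b) with h | h
    · simp only [List.foldl_cons, h]
      rcases inner_cases t j pvKeywords b with h2 | h2
      · exact Or.inl h2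
      · rcases h2 with ⟨p, hp, he, hsw⟩
        exact Or.inr ⟨p, hp, he, j, List.mem_cons_self, hsw⟩
    · rcases h with ⟨p, hp, he, i, hi, hsw⟩
      exact Or.inr ⟨p, hp, by simpa using he, i, List.mem_cons_of_mem _ hi, hsw⟩

-- bridge: "some position in range(len(t)) starts with w" ↔ "w in t" (for nonempty w)
lemma range_sw_iff (t w : List Char) (hw : w ≠ []) :
    (∃ i ∈ PySem.List.pyRange 0 (PySem.Chars.len t) 1,
        PySem.Chars.startswith (t.drop i.toNat) w = true) ↔
      PySem.Chars.isIn w t = true := by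
  constructor
  · rintro ⟨i, _, hsw⟩
    exact (PySem.Chars.exists_prefix_drop_iff_isIn _ _).mp
      ⟨i.toNat, (PySem.Chars.startswith_iff _ _).mp hsw⟩
  · intro h
    rcases (PySem.Chars.exists_prefix_drop_iff_isIn _ _).mpr h with ⟨j, hj⟩
    have hjlt : j < t.length := by
      by_contra hge
      have : t.drop j = [] := List.drop_eq_nil_of_le (by omega)
      rw [this] at hj
      exact hw (List.prefix_nil.mp hj)
    refine ⟨(j : Int), ?_, ?_⟩
    · rw [PySem.List.mem_pyRange_one]
      constructor
      · exact Int.natCast_nonneg j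
      · simp [PySem.Chars.len_eq]; exact_mod_cast hjlt
    · simpa [Int.toNat_natCast] using (PySem.Chars.startswith_iff _ _).mpr hj

-- abbreviation used only in proofs: B's computed minimum priority
def pvBest (t : List Char) : Nat :=
  (PySem.List.pyRange 0 (PySem.Chars.len t) 1).foldl
    (fun b i => pvKeywords.foldl (pvStep t i) b) 5

lemma pvBest_le (t : List Char) (p : Nat × String) (hp : p ∈ pvKeywords)
    (h : PySem.Chars.isIn p.2.toList t = true) : pvBest t ≤ p.1 := by
  have hw : p.2.toList ≠ [] := by
    fin_cases hp <;> simp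
  rcases (range_sw_iff t p.2.toList hw).mpr h with ⟨i, hi, hsw⟩
  exact outer_le_of_mem t _ 5 i hi p hp hsw

lemma pvBest_cases (t : List Char) :
    pvBest t = 5 ∨
      ∃ p ∈ pvKeywords, p.1 = pvBest t ∧ PySem.Chars.isIn p.2.toList t = true := by
  rcases outer_cases t (PySem.List.pyRange 0 (PySem.Chars.len t) 1) 5 with h | h
  · exact Or.inl h
  · rcases h with ⟨p, hp, he, i, hi, hsw⟩
    refine Or.inr ⟨p, hp, he, ?_⟩
    have hw : p.2.toList ≠ [] := by fin_cases hp <;> simp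
    exact (range_sw_iff t p.2.toList hw).mp ⟨i, hi, hsw⟩

-- ===== VERDICT (by name: the statement is the Claim_ definition above) =====
theorem detect_role_type_py_spec : Claim_equal_detect_role_type_py := by
  intro job_title _
  simp only [Spec_detect_role_type_py, detect_role_type_py, detect_role_type_py_alt]
  set s := PySem.Str.lower job_title with hs
  set t := s.toList with ht
  have hbest : ((PySem.List.pyRange 0 (PySem.Chars.len t) 1).foldl
      (fun best i =>
        pvKeywords.foldl
          (fun b p =>
            if PySem.Chars.startswith (t.drop i.toNat) p.2.toList && decide (p.1 < b) then p.1 else b)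
          best) 5) = pvBest t := rfl
  rw [hbest]
  -- Str.isIn on s is Chars.isIn on t
  have hIn : ∀ w : String, PySem.Str.isIn w s = PySem.Chars.isIn w.toList t := by
    intro w; simp [PySem.Str.isIn, ht]
  -- group conditions
  by_cases c0 : PySem.Chars.isIn "wordpress".toList t = true
  · have h0 : pvBest t ≤ 0 := pvBest_le t (0, "wordpress") (by simp [pvKeywords]) c0
    have : pvBest t = 0 := Nat.le_zero.mp h0
    simp_all [pvLabels, PySem.List.pyGet?, PySem.List.pyIdx?]
  · by_cases c1 : PySem.Chars.isIn "frontend".toList t = true ∨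
        PySem.Chars.isIn "front-end".toList t = true ∨
        PySem.Chars.isIn "front end".toList t = true
    · have h1 : pvBest t ≤ 1 := by
        rcases c1 with h | h | h
        · exact pvBest_le t (1, "frontend") (by simp [pvKeywords]) h
        · exact pvBest_le t (1, "front-end") (by simp [pvKeywords]) h
        · exact pvBest_le t (1, "front end") (by simp [pvKeywords]) h
      have hne0 : pvBest t ≠ 0 := by
        intro h0
        rcases pvBest_cases t with h | ⟨p, hp, he, hin⟩
        · omega
        · rw [h0] at he
          fin_cases hp <;> simp_all
      have hb : pvBest t = 1 := by omega
      rcases c1 with h | h | h <;>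
        simp_all [pvLabels, PySem.List.pyGet?, PySem.List.pyIdx?]
    · push Not at c1
      obtain ⟨n1, n2, n3⟩ := c1
      by_cases c2 : PySem.Chars.isIn "full-stack".toList t = true ∨
          PySem.Chars.isIn "full stack".toList t = true ∨
          PySem.Chars.isIn "fullstack".toList t = true
      · have h2 : pvBest t ≤ 2 := by
          rcases c2 with h | h | h
          · exact pvBest_le t (2, "full-stack") (by simp [pvKeywords]) h
          · exact pvBest_le t (2, "full stack") (by simp [pvKeywords]) h
          · exact pvBest_le t (2, "fullstack") (by simp [pvKeywords]) h
        have hlow : pvBest t ≠ 0 ∧ pvBest t ≠ 1 := by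
          constructor <;> intro h0 <;>
          · rcases pvBest_cases t with h | ⟨p, hp, he, hin⟩
            · omega
            · rw [h0] at he
              fin_cases hp <;> simp_all
        have hb : pvBest t = 2 := by omega
        rcases c2 with h | h | h <;>
          simp_all [pvLabels, PySem.List.pyGet?, PySem.List.pyIdx?]
      · push Not at c2
        obtain ⟨m1, m2, m3⟩ := c2
        by_cases c3 : PySem.Chars.isIn "agency".toList t = true ∨
            PySem.Chars.isIn "client".toList t = true ∨
            PySem.Chars.isIn "consulting".toList t = true
        · have h3 : pvBest t ≤ 3 := by
            rcases c3 with h | h | h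
            · exact pvBest_le t (3, "agency") (by simp [pvKeywords]) h
            · exact pvBest_le t (3, "client") (by simp [pvKeywords]) h
            · exact pvBest_le t (3, "consulting") (by simp [pvKeywords]) h
          have hlow : pvBest t ≠ 0 ∧ pvBest t ≠ 1 ∧ pvBest t ≠ 2 := by
            refine ⟨?_, ?_, ?_⟩ <;> intro h0 <;>
            · rcases pvBest_cases t with h | ⟨p, hp, he, hin⟩
              · omega
              · rw [h0] at he
                fin_cases hp <;> simp_all
          have hb : pvBest t = 3 := by omega
          rcases c3 with h | h | h <;>
            simp_all [pvLabels, PySem.List.pyGet?, PySem.List.pyIdx?]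
        · push Not at c3
          obtain ⟨a1, a2, a3⟩ := c3
          by_cases c4 : PySem.Chars.isIn "education".toList t = true ∨
              PySem.Chars.isIn "nonprofit".toList t = true ∨
              PySem.Chars.isIn "healthcare".toList t = true ∨
              PySem.Chars.isIn "mission".toList t = true
          · have h4 : pvBest t ≤ 4 := by
              rcases c4 with h | h | h | h
              · exact pvBest_le t (4, "education") (by simp [pvKeywords]) h
              · exact pvBest_le t (4, "nonprofit") (by simp [pvKeywords]) h
              · exact pvBest_le t (4, "healthcare") (by simp [pvKeywords]) h
              · exact pvBest_le t (4, "mission") (by simp [pvKeywords]) h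
            have hlow : pvBest t ≠ 0 ∧ pvBest t ≠ 1 ∧ pvBest t ≠ 2 ∧ pvBest t ≠ 3 := by
              refine ⟨?_, ?_, ?_, ?_⟩ <;> intro h0 <;>
              · rcases pvBest_cases t with h | ⟨p, hp, he, hin⟩
                · omega
                · rw [h0] at he
                  fin_cases hp <;> simp_all
            have hb : pvBest t = 4 := by omega
            rcases c4 with h | h | h | h <;>
              simp_all [pvLabels, PySem.List.pyGet?, PySem.List.pyIdx?]
          · push Not at c4
            obtain ⟨e1, e2, e3, e4⟩ := c4
            have hb : pvBest t = 5 := by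
              rcases pvBest_cases t with h | ⟨p, hp, he, hin⟩
              · exact h
              · fin_cases hp <;> simp_all
            simp_all
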